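-- pv_equiv track=rewrite | github.com/owenvickery/cg2at | database/bin/gen.py | sort_connectivity
-- ===== SOURCE A (Python) =====
-- def sort_connectivity(atom_dict, heavy_bond):
--     cut_group = {}
--     if len(atom_dict) > 1:
--         for group in atom_dict:
--             cut_group[group]={}
--             group_atoms = [atom for frag in atom_dict[group] for atom in atom_dict[group][frag] if atom in heavy_bond]
--             non_self_group = [x for x in atom_dict.keys() if x != group]
--             for atom in group_atoms:
--                 for bond in heavy_bond[atom]:
--                     for group_2 in non_self_group:
--                         for frag in atom_dict[group_2]:
--                             if bond in atom_dict[group_2][frag]: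
--                                 cut_group[group][atom] = [frag]
--     return cut_group
-- ===== SOURCE B (Python) =====
-- def sort_connectivity(atom_dict, heavy_bond):
--     if len(atom_dict) <= 1:
--         return {}
--     # index: bond value -> list of (group, frag) pairs whose atom list contains it, in iteration order
--     occ = {}
--     for group, frags in atom_dict.items():
--         for frag, atoms in frags.items():
--             for v in set(atoms):
--                 occ.setdefault(v, []).append((group, frag))
--     cut_group = {}
--     for group, frags in atom_dict.items():
--         inner = {}
--         for frag, atoms in frags.items():
--             for atom in atoms:
--                 if atom in heavy_bond:
--                     for bond in heavy_bond[atom]: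
--                         for g2, f2 in occ.get(bond, []):
--                             if g2 != group:
--                                 inner[atom] = [f2]
--         cut_group[group] = inner
--     return cut_group
-- ===== Notes on version B (the rewrite author's own statement) =====
-- stated objective: faster
-- what changed: B precomputes one dict mapping each atom value to the (group, fragment) pairs that contain it, so each bond is resolved by a single O(1) index lookup instead of A's rescan of every other group's every fragment list for every bond.
import Mathlib
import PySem

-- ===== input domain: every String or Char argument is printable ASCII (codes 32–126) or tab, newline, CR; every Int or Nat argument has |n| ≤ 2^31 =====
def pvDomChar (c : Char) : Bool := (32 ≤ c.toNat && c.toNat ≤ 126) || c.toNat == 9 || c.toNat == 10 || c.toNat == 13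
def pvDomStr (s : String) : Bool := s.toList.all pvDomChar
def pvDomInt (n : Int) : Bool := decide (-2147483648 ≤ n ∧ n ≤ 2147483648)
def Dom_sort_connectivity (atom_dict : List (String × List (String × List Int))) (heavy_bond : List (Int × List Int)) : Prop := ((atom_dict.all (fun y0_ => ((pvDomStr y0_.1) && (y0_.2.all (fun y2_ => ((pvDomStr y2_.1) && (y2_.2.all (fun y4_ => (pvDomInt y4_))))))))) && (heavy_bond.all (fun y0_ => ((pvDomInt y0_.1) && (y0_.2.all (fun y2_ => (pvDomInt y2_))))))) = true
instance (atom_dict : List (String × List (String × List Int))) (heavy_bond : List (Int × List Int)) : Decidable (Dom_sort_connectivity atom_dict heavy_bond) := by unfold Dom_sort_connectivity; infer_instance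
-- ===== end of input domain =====

-- B replaces A's rescan of every other group's fragments for every bond by a precomputed
-- index from atom value to the (group, fragment) pairs containing it (objective: faster).

-- dict lookups d[k] (first match; Pre_ guarantees unique keys, so = Python's dict lookup)
def pvFindGrp (xs : List (String × List (String × List Int))) (k : String) : List (String × List Int) :=
  ((xs.find? (fun p => p.1 == k)).map Prod.snd).getD []
def pvFindAtoms (xs : List (String × List Int)) (k : String) : List Int :=
  ((xs.find? (fun p => p.1 == k)).map Prod.snd).getD []
def pvFindBonds (xs : List (Int × List Int)) (k : Int) : List Int :=
  ((xs.find? (fun p => p.1 == k)).map Prod.snd).getD []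
-- 'atom in heavy_bond' (key membership)
def pvHbHas (xs : List (Int × List Int)) (k : Int) : Bool := xs.any (fun p => p.1 == k)

-- ===== PORT A =====
def sort_connectivity (atom_dict : List (String × List (String × List Int))) (heavy_bond : List (Int × List Int)) : List (String × List (Int × List String)) :=
  if 1 < atom_dict.length then
    atom_dict.foldl (fun cut gp =>
      let gd := pvFindGrp atom_dict gp.1
      let group_atoms := gd.flatMap (fun fp => (pvFindAtoms gd fp.1).filter (fun a => pvHbHas heavy_bond a))
      let non_self_group := (atom_dict.map Prod.fst).filter (fun x => x ≠ gp.1)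
      let inner : PySem.Dict Int (List String) :=
        group_atoms.foldl (fun inner atom =>
          (pvFindBonds heavy_bond atom).foldl (fun inner bond =>
            non_self_group.foldl (fun inner g2 =>
              (pvFindGrp atom_dict g2).foldl (fun inner fp =>
                if bond ∈ pvFindAtoms (pvFindGrp atom_dict g2) fp.1 then inner.insert atom [fp.1] else inner)
                inner) inner) inner) PySem.Dict.empty
      cut ++ [(gp.1, inner.items)]) []
  else []

-- ===== PORT B =====
def sort_connectivity_alt (atom_dict : List (String × List (String × List Int))) (heavy_bond : List (Int × List Int)) : List (String × List (Int × List String)) :=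
  if atom_dict.length ≤ 1 then []
  else
    let occ : PySem.Dict Int (List (String × String)) :=
      atom_dict.foldl (fun occ gp =>
        gp.2.foldl (fun occ fp =>
          (PySem.Set.ofList fp.2).foldl (fun occ v => occ.modify v [] (fun l => l ++ [(gp.1, fp.1)])) occ) occ)
        PySem.Dict.empty
    atom_dict.foldl (fun cut gp =>
      let inner : PySem.Dict Int (List String) :=
        gp.2.foldl (fun inner fp =>
          fp.2.foldl (fun inner atom =>
            if pvHbHas heavy_bond atom then
              (pvFindBonds heavy_bond atom).foldl (fun inner bond =>
                (occ.getD bond []).foldl (fun inner q =>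
                  if q.1 ≠ gp.1 then inner.insert atom [q.2] else inner) inner) inner
            else inner) inner) PySem.Dict.empty
      cut ++ [(gp.1, inner.items)]) []

-- ===== PRECONDITION & SPEC =====
-- Pre_ excludes association lists with duplicate group, fragment or heavy-bond keys: such lists do
-- not represent a Python dict (dict construction collapses duplicates), so first-match behaviour
-- on them is an artefact of the list encoding.
def Pre_sort_connectivity (atom_dict : List (String × List (String × List Int))) (heavy_bond : List (Int × List Int)) : Prop :=
  (atom_dict.map Prod.fst).Nodup ∧ (heavy_bond.map Prod.fst).Nodup ∧
    ∀ p ∈ atom_dict, (p.2.map Prod.fst).Nodup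
instance (atom_dict : List (String × List (String × List Int))) (heavy_bond : List (Int × List Int)) : Decidable (Pre_sort_connectivity atom_dict heavy_bond) := by unfold Pre_sort_connectivity; infer_instance

def pvWitness_sort_connectivity : (List (String × List (String × List Int))) × (List (Int × List Int)) :=
  ([("A", [("f1", [1])]), ("B", [("f2", [2])])], [(1, [2]), (2, [1])])

def Spec_sort_connectivity (atom_dict : List (String × List (String × List Int))) (heavy_bond : List (Int × List Int)) (out : List (String × List (Int × List String))) : Prop := out = sort_connectivity_alt atom_dict heavy_bond
instance (atom_dict : List (String × List (String × List Int))) (heavy_bond : List (Int × List Int)) (out : List (String × List (Int × List String))) : Decidable (Spec_sort_connectivity atom_dict heavy_bond out) := by unfold Spec_sort_connectivity; infer_instance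

-- ===== CLAIM (what is proved, stated in full; the proofs are below) =====
def Claim_equal_sort_connectivity : Prop := ∀ (atom_dict : List (String × List (String × List Int))) (heavy_bond : List (Int × List Int)), Dom_sort_connectivity atom_dict heavy_bond → Pre_sort_connectivity atom_dict heavy_bond → Spec_sort_connectivity atom_dict heavy_bond (sort_connectivity atom_dict heavy_bond)

-- ===== LEMMAS AND PROOFS =====

-- B's index dict, named for the proof (definitionally the 'occ' built inside sort_connectivity_alt)
def pvOcc (atom_dict : List (String × List (String × List Int))) : PySem.Dict Int (List (String × String)) :=
  atom_dict.foldl (fun occ gp =>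
    gp.2.foldl (fun occ fp =>
      (PySem.Set.ofList fp.2).foldl (fun occ v => occ.modify v [] (fun l => l ++ [(gp.1, fp.1)])) occ) occ)
    PySem.Dict.empty

theorem pvFoldlAppendSingleton {α β : Type} (l : List α) (f : α → β) (acc : List β) :
    l.foldl (fun a x => a ++ [f x]) acc = acc ++ l.map f := by
  induction l generalizing acc with
  | nil => simp
  | cons x xs ih => simp [ih]

theorem pvFoldlId {α β : Type} (l : List α) (init : β) :
    l.foldl (fun a _ => a) init = init := by
  induction l generalizing init with
  | nil => rfl
  | cons x xs ih => simpa using ih _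

theorem pvFoldlCongrMem {α β : Type} (l : List α) (f g : β → α → β) (init : β)
    (h : ∀ b, ∀ x ∈ l, f b x = g b x) : l.foldl f init = l.foldl g init := by
  induction l generalizing init with
  | nil => rfl
  | cons x xs ih =>
      simp only [List.foldl_cons]
      rw [h init x (by simp)]
      exact ih _ (fun b y hy => h b y (by simp [hy]))

theorem pvLookupEq {α β : Type} [BEq α] [LawfulBEq α] (xs : List (α × β)) (p : α × β) (d : β)
    (hnd : (xs.map Prod.fst).Nodup) (hp : p ∈ xs) :
    ((xs.find? (fun q => q.1 == p.1)).map Prod.snd).getD d = p.2 := by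
  induction xs with
  | nil => cases hp
  | cons x xs ih =>
      simp only [List.map_cons, List.nodup_cons] at hnd
      rcases List.mem_cons.mp hp with h | h
      · subst h; simp [List.find?]
      · have hne : ¬ (x.1 == p.1) = true := by
          intro hbe
          exact hnd.1 (by
            have : x.1 = p.1 := by simpa using hbe
            rw [this]
            exact List.mem_map.mpr ⟨p, h, rfl⟩)
        simp only [List.find?, hne]
        simp only [Bool.false_eq_true, if_false] at *
        exact ih hnd.2 h

theorem pvFilterBeqNodup (l : List Int) (hnd : l.Nodup) (b : Int) :
    l.filter (fun x => x == b) = if b ∈ l then [b] else [] := by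
  induction l with
  | nil => simp
  | cons x xs ih =>
      simp only [List.nodup_cons] at hnd
      by_cases hx : x = b
      · subst hx
        have hresid : xs.filter (fun y => y == x) = [] := by
          apply List.filter_eq_nil_iff.mpr
          intro a ha hbe
          exact hnd.1 (by simpa using (LawfulBEq.eq_of_beq hbe) ▸ ha)
        simp [List.filter_cons, hresid]
      · have hne : ¬ (x == b) = true := by simpa using hx
        simp only [List.filter_cons, hne, Bool.false_eq_true, if_false, ih hnd.2]
        have hbx : ¬ b = x := fun h => hx h.symm
        simp [List.mem_cons, hbx]

theorem pvFilterBeqOfList (l : List Int) (b : Int) :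
    (PySem.Set.ofList l).filter (fun x => x == b) = if b ∈ l then [b] else [] := by
  rw [pvFilterBeqNodup _ (PySem.Set.nodup_ofList l) b]
  by_cases hb : b ∈ l <;> simp [hb, PySem.Set.mem_ofList]

theorem pvOcc_getD (ad : List (String × List (String × List Int))) (bond : Int) :
    (pvOcc ad).getD bond [] =
      ad.flatMap (fun gp => gp.2.flatMap (fun fp =>
        if bond ∈ fp.2 then [(gp.1, fp.1)] else [])) := by
  have h1 : pvOcc ad =
      (ad.flatMap (fun gp => gp.2.flatMap (fun fp =>
        (PySem.Set.ofList fp.2).map (fun v => (v, (gp.1, fp.1)))))).foldl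
        (fun d p => d.modify p.1 [] (fun l => l ++ [p.2])) PySem.Dict.empty := by
    unfold pvOcc
    simp only [List.foldl_flatMap, List.foldl_map]
  rw [h1, PySem.Dict.getD_foldl_modify_append]
  simp only [PySem.Dict.getD_empty, List.nil_append, List.filter_flatMap, List.map_flatMap,
    List.filter_map, List.map_map]
  apply List.flatMap_congr
  intro gp _
  apply List.flatMap_congr
  intro fp _
  have : ((PySem.Set.ofList fp.2).filter
      ((fun p => p.1 == bond) ∘ (fun v => (v, (gp.1, fp.1))))) =
      (PySem.Set.ofList fp.2).filter (fun x => x == bond) := rfl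
  rw [this, pvFilterBeqOfList]
  by_cases hb : bond ∈ fp.2 <;> simp [hb]

-- the per-(atom, bond) core: A's scan of every other group = B's filtered index lookup
theorem pvBondLevel (ad : List (String × List (String × List Int)))
    (hnd : (ad.map Prod.fst).Nodup) (h3 : ∀ p ∈ ad, (p.2.map Prod.fst).Nodup)
    (g : String) (atom bond : Int) (inner : PySem.Dict Int (List String)) :
    ((ad.map Prod.fst).filter (fun x => x ≠ g)).foldl (fun inner g2 =>
        (pvFindGrp ad g2).foldl (fun inner fp =>
          if bond ∈ pvFindAtoms (pvFindGrp ad g2) fp.1 then inner.insert atom [fp.1] else inner)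
          inner) inner
    = ((pvOcc ad).getD bond []).foldl (fun inner q =>
        if q.1 ≠ g then inner.insert atom [q.2] else inner) inner := by
  rw [pvOcc_getD, List.foldl_flatMap, List.foldl_filter, List.foldl_map]
  apply pvFoldlCongrMem
  intro b gp hgp
  have hgrp : pvFindGrp ad gp.1 = gp.2 := by
    unfold pvFindGrp; exact pvLookupEq ad gp [] hnd hgp
  rw [List.foldl_flatMap]
  by_cases hg : gp.1 = g
  · have hd : decide (gp.1 ≠ g) = false := by simp [hg]
    rw [hd]
    simp only [Bool.false_eq_true, if_false]
    rw [eq_comm]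
    have hstep : ∀ (b' : PySem.Dict Int (List String)), ∀ fp ∈ gp.2,
        (if bond ∈ fp.2 then [(gp.1, fp.1)] else []).foldl (fun inner q =>
          if q.1 ≠ g then inner.insert atom [q.2] else inner) b' = b' := by
      intro b' fp _
      by_cases hbm : bond ∈ fp.2 <;> simp [hbm, hg]
    rw [pvFoldlCongrMem _ _ (fun a _ => a) _ hstep, pvFoldlId]
  · have hd : decide (gp.1 ≠ g) = true := by simp [hg]
    rw [hd]
    simp only [if_true, hgrp]
    apply pvFoldlCongrMem
    intro b' fp hfp
    have hat : pvFindAtoms gp.2 fp.1 = fp.2 := by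
      unfold pvFindAtoms; exact pvLookupEq gp.2 fp [] (h3 gp hgp) hfp
    rw [hat]
    by_cases hbm : bond ∈ fp.2 <;> simp [hbm, hg]

theorem sort_connectivity_spec : Claim_equal_sort_connectivity := by
  intro ad hb _hdom hpre
  obtain ⟨hnd, _hndhb, h3⟩ := hpre
  unfold Spec_sort_connectivity sort_connectivity sort_connectivity_alt
  by_cases hlen : 1 < ad.length
  · have hlen' : ¬ ad.length ≤ 1 := by omega
    simp only [hlen, if_true, hlen', if_false]
    rw [pvFoldlAppendSingleton, pvFoldlAppendSingleton, List.nil_append, List.nil_append]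
    apply List.map_congr_left
    intro gp hgp
    congr 1
    congr 1
    have hgrp : pvFindGrp ad gp.1 = gp.2 := by
      unfold pvFindGrp; exact pvLookupEq ad gp [] hnd hgp
    rw [hgrp]
    have hga : gp.2.flatMap (fun fp => (pvFindAtoms gp.2 fp.1).filter (fun a => pvHbHas hb a))
        = gp.2.flatMap (fun fp => fp.2.filter (fun a => pvHbHas hb a)) := by
      apply List.flatMap_congr
      intro fp hfp
      have hat : pvFindAtoms gp.2 fp.1 = fp.2 := by
        unfold pvFindAtoms; exact pvLookupEq gp.2 fp [] (h3 gp hgp) hfp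
      rw [hat]
    rw [hga, List.foldl_flatMap]
    apply pvFoldlCongrMem
    intro b fp _
    rw [List.foldl_filter]
    apply pvFoldlCongrMem
    intro b' atom _
    by_cases hh : pvHbHas hb atom
    · simp only [hh, if_true]
      have hfun : ∀ (b'' : PySem.Dict Int (List String)) (bond : Int),
          ((ad.map Prod.fst).filter (fun x => x ≠ gp.1)).foldl (fun inner g2 =>
            (pvFindGrp ad g2).foldl (fun inner fp =>
              if bond ∈ pvFindAtoms (pvFindGrp ad g2) fp.1 then inner.insert atom [fp.1] else inner)
              inner) b''
          = ((pvOcc ad).getD bond []).foldl (fun inner q =>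
              if q.1 ≠ gp.1 then inner.insert atom [q.2] else inner) b'' := by
        intro b'' bond
        exact pvBondLevel ad hnd h3 gp.1 atom bond b''
      apply pvFoldlCongrMem
      intro b'' bond _
      exact hfun b'' bond
    · simp [hh]
  · have hlen' : ad.length ≤ 1 := by omega
    simp [hlen, hlen']
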